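-- pv_equiv track=rewrite | github.com/riddheshSajwan/data_structures_algorithm | queues/reversingElementsOfQueue.py | solve
-- ===== SOURCE A (Python) =====
-- from collections import deque
--
-- def solve(A, B):
--     n = len(A)
--     if n < 2:
--         return A
--     q = deque()
--     for i in range(B):
--         q.append(A[i])
--     i = B - 1
--     while len(q) != 0:
--         A[i] = q.popleft()
--         i -= 1
--     return A
-- ===== SOURCE B (Python) =====
-- def solve(A, B):
--     n = len(A)
--     if n < 2:
--         return A
--     for i in range(B // 2):
--         A[i], A[B - 1 - i] = A[B - 1 - i], A[i]
--     return A
-- ===== Notes on version B (the rewrite author's own statement) =====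
-- stated objective: simpler
-- what changed: Replaces the deque copy-then-write-back two-phase pass with a single in-place two-pointer swap loop over B//2 index pairs.
import Mathlib
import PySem

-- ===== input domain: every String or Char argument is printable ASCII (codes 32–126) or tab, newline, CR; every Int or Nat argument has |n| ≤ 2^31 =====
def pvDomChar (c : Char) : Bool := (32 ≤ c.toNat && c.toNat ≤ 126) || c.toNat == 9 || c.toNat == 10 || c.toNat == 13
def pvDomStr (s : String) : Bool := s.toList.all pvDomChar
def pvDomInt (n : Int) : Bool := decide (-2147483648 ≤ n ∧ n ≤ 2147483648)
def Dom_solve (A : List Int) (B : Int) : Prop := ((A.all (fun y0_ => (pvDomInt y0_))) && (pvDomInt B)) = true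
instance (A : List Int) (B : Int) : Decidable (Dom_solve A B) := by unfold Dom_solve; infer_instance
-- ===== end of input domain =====

-- B replaces A's deque copy-then-write-back two-phase pass by a single in-place
-- two-pointer swap loop (simpler, O(1) extra space). Both Pythons mutate A in place
-- in the same way; the equivalence proved here is about the return value.

-- ===== PORT A =====
-- while len(q) != 0: A[i] = q.popleft(); i -= 1      (pySetD is exact here: under Pre_ the index is in range)
def solveWriteBack (A : List Int) (i : Int) (q : List Int) : List Int :=
  match q with
  | [] => A
  | x :: q' => solveWriteBack (PySem.List.pySetD A i x) (i - 1) q'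

def solve (A : List Int) (B : Int) : List Int :=
  if A.length < 2 then A
  else
    -- for i in range(B): q.append(A[i])   (pyGetD is exact here: under Pre_ the index is in range)
    let q := (PySem.List.pyRange 0 B 1).foldl (fun q i => q ++ [PySem.List.pyGetD A i 0]) []
    solveWriteBack A (B - 1) q

-- ===== PORT B =====
-- A[i], A[B-1-i] = A[B-1-i], A[i]   (both reads happen before both writes; indices in range under Pre_)
def swapStep (B : Int) (L : List Int) (i : Int) : List Int :=
  let x := PySem.List.pyGetD L i 0
  let y := PySem.List.pyGetD L (B - 1 - i) 0
  PySem.List.pySetD (PySem.List.pySetD L i y) (B - 1 - i) x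

def solve_alt (A : List Int) (B : Int) : List Int :=
  if A.length < 2 then A
  else (PySem.List.pyRange 0 (PySem.Int.floordiv B 2) 1).foldl (swapStep B) A

-- ===== PRECONDITION & SPEC =====
-- Pre_ excludes exactly the inputs where A raises IndexError: len(A) >= 2 together with B > len(A)
-- (the read A[i] with i = len(A) fails); B's swap loop raises there as well.
def Pre_solve (A : List Int) (B : Int) : Prop := A.length < 2 ∨ B ≤ (A.length : Int)
instance (A : List Int) (B : Int) : Decidable (Pre_solve A B) := by unfold Pre_solve; infer_instance
def pvWitness_solve : List Int × Int := ([1, 2, 3, 4], 3)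
def Spec_solve (A : List Int) (B : Int) (out : List Int) : Prop := out = solve_alt A B
instance (A : List Int) (B : Int) (out : List Int) : Decidable (Spec_solve A B out) := by unfold Spec_solve; infer_instance

-- ===== CLAIM (what is proved, stated in full; the proofs are below) =====
def Claim_equal_solve : Prop := ∀ (A : List Int) (B : Int), Dom_solve A B → Pre_solve A B → Spec_solve A B (solve A B)

-- ===== LEMMAS AND PROOFS =====

theorem drop_set_self (l : List Int) (m : Nat) (a : Int) (h : m < l.length) :
    (l.set m a).drop m = a :: l.drop (m + 1) := by
  rw [List.drop_eq_getElem_cons (by simpa using h)]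
  simp [List.drop_set, List.getElem_set_self]

theorem getD_set_eq (L : List Int) (m j : Nat) (v : Int) (hm : m < L.length) :
    (L.set m v).getD j 0 = if j = m then v else L.getD j 0 := by
  by_cases h : j = m
  · subst h
    simp [List.getD_eq_getElem?_getD, hm]
  · simp [List.getD_eq_getElem?_getD, List.getElem?_set_ne (show m ≠ j by omega), h]

theorem mapRange_take (b : Nat) (A : List Int) (h : b ≤ A.length) :
    (List.range b).map (fun k => A.getD k 0) = A.take b := by
  induction b with
  | zero => simp
  | succ n ih =>
    rw [List.range_succ, List.map_append, ih (by omega), List.take_add_one]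
    simp [List.getD_eq_getElem?_getD, List.getElem?_eq_getElem (show n < A.length by omega)]

theorem writeBack_eq (q : List Int) : ∀ (A : List Int), q.length ≤ A.length →
    solveWriteBack A ((q.length : Int) - 1) q = q.reverse ++ A.drop q.length := by
  induction q with
  | nil => intro A _; simp [solveWriteBack]
  | cons x q' ih =>
    intro A h
    have h' : q'.length < A.length := by simpa using h
    have hlen : ((x :: q').length : Int) - 1 = ((q'.length : Nat) : Int) := by
      simp
    rw [solveWriteBack, hlen, PySem.List.pySetD_natCast]
    rw [ih (A.set q'.length x) (by simpa using le_of_lt h')]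
    rw [drop_set_self A q'.length x h']
    simp [List.reverse_cons, List.append_assoc]

-- invariant of B's two-pointer loop: after the indices below a have been processed,
-- positions < a and ≥ b - a (within the first b) hold the reversed values
theorem swap_fold (b : Nat) (A : List Int) (hb : b ≤ A.length) (hb1 : 1 ≤ b) :
    ∀ (k a : Nat) (L : List Int), a + k = b / 2 → L.length = A.length →
      (∀ j, j < A.length →
        L.getD j 0 = if j < a ∨ (b - a ≤ j ∧ j < b) then A.getD (b - 1 - j) 0 else A.getD j 0) →
      (((PySem.List.pyRange (a : Int) ((b / 2 : Nat) : Int) 1).foldl (swapStep (b : Int)) L).length = A.length ∧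
       ∀ j, j < A.length →
        ((PySem.List.pyRange (a : Int) ((b / 2 : Nat) : Int) 1).foldl (swapStep (b : Int)) L).getD j 0 =
          if j < b then A.getD (b - 1 - j) 0 else A.getD j 0) := by
  intro k
  induction k with
  | zero =>
    intro a L ha hlen hinv
    have ha' : a = b / 2 := by omega
    rw [PySem.List.pyRange_one_eq_nil (by exact_mod_cast le_of_eq ha'.symm)]
    refine ⟨hlen, fun j hj => ?_⟩
    rw [List.foldl_nil, hinv j hj]
    by_cases hjb : j < b
    · by_cases h1 : j < a ∨ (b - a ≤ j ∧ j < b)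
      · rw [if_pos h1, if_pos hjb]
      · rw [if_neg h1, if_pos hjb]
        -- only the odd middle index j = a = b - 1 - j remains
        have : b - 1 - j = j := by omega
        rw [this]
    · rw [if_neg (by omega : ¬(j < a ∨ (b - a ≤ j ∧ j < b))), if_neg hjb]
  | succ k ih =>
    intro a L ha hlen hinv
    have ha2 : 2 * a + 2 ≤ b := by omega
    have hcons : PySem.List.pyRange (a : Int) ((b / 2 : Nat) : Int) 1
        = (a : Int) :: PySem.List.pyRange ((a : Int) + 1) ((b / 2 : Nat) : Int) 1 :=
      PySem.List.pyRange_one_cons (by exact_mod_cast show a < b / 2 by omega)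
    rw [hcons, List.foldl_cons]
    have hcast : ((a : Int) + 1) = (((a + 1 : Nat)) : Int) := by push_cast; ring
    rw [hcast]
    have hidx : (b : Int) - 1 - (a : Int) = ((b - 1 - a : Nat) : Int) := by omega
    have hba : b - 1 - a < A.length := by omega
    have hstep : swapStep (b : Int) L (a : Int)
        = (L.set a (L.getD (b - 1 - a) 0)).set (b - 1 - a) (L.getD a 0) := by
      simp only [swapStep, hidx, PySem.List.pyGetD_natCast, PySem.List.pySetD_natCast]
    rw [hstep]
    apply ih (a + 1)
    · omega
    · simp [hlen]
    · intro j hj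
      have hLa : L.getD a 0 = A.getD a 0 := by
        rw [hinv a (by omega)]; split_ifs with h <;> [omega; rfl]
      have hLba : L.getD (b - 1 - a) 0 = A.getD (b - 1 - a) 0 := by
        rw [hinv (b - 1 - a) (by omega)]; split_ifs with h <;> [omega; rfl]
      rw [getD_set_eq _ _ _ _ (by simp [hlen]; omega),
          getD_set_eq _ _ _ _ (by rw [hlen]; omega)]
      by_cases hj1 : j = b - 1 - a
      · rw [if_pos hj1, hLa, hj1]
        have hcond : b - 1 - a < a + 1 ∨ (b - (a + 1) ≤ b - 1 - a ∧ b - 1 - a < b) := by omega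
        rw [if_pos hcond]
        have : b - 1 - (b - 1 - a) = a := by omega
        rw [this]
      · rw [if_neg hj1]
        by_cases hj2 : j = a
        · rw [if_pos hj2, hLba, hj2, if_pos (by omega)]
        · rw [if_neg hj2, hinv j hj]
          by_cases hP : j < a ∨ (b - a ≤ j ∧ j < b)
          · rw [if_pos hP, if_pos (show j < a + 1 ∨ (b - (a + 1) ≤ j ∧ j < b) by omega)]
          · rw [if_neg hP, if_neg (show ¬(j < a + 1 ∨ (b - (a + 1) ≤ j ∧ j < b)) by omega)]

theorem target_getD (A : List Int) (b j : Nat) (hb : b ≤ A.length) :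
    ((A.take b).reverse ++ A.drop b).getD j 0
      = if j < b then A.getD (b - 1 - j) 0 else A.getD j 0 := by
  have hlt : (A.take b).reverse.length = b := by simp; omega
  by_cases h : j < b
  · rw [if_pos h,
      List.getD_eq_getElem?_getD, List.getElem?_append_left (by omega),
      List.getElem?_eq_getElem (by omega : j < (A.take b).reverse.length)]
    rw [List.getElem_reverse, List.getElem_take]
    rw [List.getD_eq_getElem?_getD, List.getElem?_eq_getElem (by omega : b - 1 - j < A.length)]
    simp only [Option.getD_some]
    congr 1
    simp only [List.length_take]
    omega
  · rw [if_neg h, List.getD_eq_getElem?_getD, List.getElem?_append_right (by omega), hlt,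
      List.getElem?_drop, List.getD_eq_getElem?_getD]
    congr 2
    omega

theorem floordiv_two_nonpos (B : Int) (h : B ≤ 0) : PySem.Int.floordiv B 2 ≤ 0 := by
  have hm := PySem.Int.floordiv_mul_add_mod B 2
  have h2 := PySem.Int.mod_two_eq B
  omega

theorem solve_alt_eq_target (A : List Int) (B : Int) (h2 : ¬ A.length < 2) (hB : B ≤ (A.length : Int)) :
    solve_alt A B = (A.take B.toNat).reverse ++ A.drop B.toNat := by
  rw [solve_alt, if_neg h2]
  by_cases hpos : 1 ≤ B
  · set b := B.toNat with hbdef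
    have hBb : B = (b : Int) := by omega
    have hb1 : 1 ≤ b := by omega
    have hble : b ≤ A.length := by omega
    have hfd : PySem.Int.floordiv B 2 = ((b / 2 : Nat) : Int) := by
      rw [hBb, PySem.Int.floordiv_eq_ediv_of_pos (by omega)]
      exact_mod_cast (Int.natCast_div b 2).symm
    have hmain := swap_fold b A hble hb1 (b / 2) 0 A (by omega) rfl
      (fun j hj => by simp)
    have h00 : ((0 : Nat) : Int) = (0 : Int) := by norm_num
    rw [h00] at hmain
    rw [hfd, hBb]
    apply List.ext_getElem
    · rw [hmain.1]
      simp
      omega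
    · intro j hja hjb
      have hj : j < A.length := by rw [← hmain.1]; exact hja
      have hv := hmain.2 j hj
      rw [List.getD_eq_getElem?_getD, List.getElem?_eq_getElem hja] at hv
      simp only [Option.getD_some] at hv
      rw [hv, ← target_getD A b j hble,
        List.getD_eq_getElem?_getD, List.getElem?_eq_getElem hjb]
      simp
  · have hB0 : B ≤ 0 := by omega
    rw [PySem.List.pyRange_one_eq_nil (by simpa using floordiv_two_nonpos B hB0), List.foldl_nil]
    have : B.toNat = 0 := by omega
    simp [this]

theorem solve_eq_target (A : List Int) (B : Int) (h2 : ¬ A.length < 2) (hB : B ≤ (A.length : Int)) :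
    solve A B = (A.take B.toNat).reverse ++ A.drop B.toNat := by
  rw [solve, if_neg h2]
  by_cases hpos : 1 ≤ B
  · set b := B.toNat with hbdef
    have hBb : B = (b : Int) := by omega
    have hble : b ≤ A.length := by omega
    have hq : (PySem.List.pyRange 0 B 1).foldl (fun q i => q ++ [PySem.List.pyGetD A i 0]) []
        = A.take b := by
      rw [PySem.List.foldl_append_singleton_eq_map]
      simp only [List.nil_append, PySem.List.pyRange_one, List.map_map]
      rw [show (B - 0).toNat = b by omega, ← mapRange_take b A hble]
      apply List.map_congr_left
      intro k _
      simp [Function.comp]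
    simp only [hq]
    have hlq : (A.take b).length = b := by simp; omega
    have hBi : B - 1 = (((A.take b).length : Int)) - 1 := by rw [hlq]; omega
    rw [hBi, writeBack_eq (A.take b) A (by omega), hlq]
  · have hB0 : B ≤ 0 := by omega
    rw [PySem.List.pyRange_one_eq_nil (by omega), List.foldl_nil]
    have : B.toNat = 0 := by omega
    simp [this, solveWriteBack]

-- ===== VERDICT (by name: the statement is the Claim_ definition above) =====
theorem solve_spec : Claim_equal_solve := by
  intro A B _hdom hpre
  unfold Spec_solve
  by_cases h2 : A.length < 2
  · rw [solve, solve_alt, if_pos h2, if_pos h2]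
  · have hB : B ≤ (A.length : Int) := by
      rcases hpre with h | h
      · omega
      · exact h
    rw [solve_eq_target A B h2 hB, solve_alt_eq_target A B h2 hB]
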